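-- pv_equiv track=rewrite | github.com/zjunlp/OneEdit | src/utils.py | find_pairwise_connected_triples
-- ===== SOURCE A (Python) =====
-- from collections import defaultdict
--
-- def find_pairwise_connected_triples(triples):
--     out_degree = defaultdict(list)
--
--     for triple in triples:
--         start, _, end = triple
--         out_degree[start].append(triple)
--
--     connected_pairs = []
--     for triple in triples:
--         _, _, end = triple
--         if end in out_degree:
--             for next_triple in out_degree[end]:
--                 connected_pairs.append((triple, next_triple))
--     return connected_pairs
-- ===== SOURCE B (Python) =====
-- def find_pairwise_connected_triples(triples):
--     connected_pairs = []
--     for t1 in triples: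
--         _, _, end = t1
--         for t2 in triples:
--             start, _, _ = t2
--             if start == end:
--                 connected_pairs.append((t1, t2))
--     return connected_pairs
-- ===== Notes on version B (the rewrite author's own statement) =====
-- stated objective: simpler
-- what changed: Replaces the build-a-defaultdict-index-then-scan strategy with a plain nested double loop that compares each triple's end to each triple's start directly.
import Mathlib
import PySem

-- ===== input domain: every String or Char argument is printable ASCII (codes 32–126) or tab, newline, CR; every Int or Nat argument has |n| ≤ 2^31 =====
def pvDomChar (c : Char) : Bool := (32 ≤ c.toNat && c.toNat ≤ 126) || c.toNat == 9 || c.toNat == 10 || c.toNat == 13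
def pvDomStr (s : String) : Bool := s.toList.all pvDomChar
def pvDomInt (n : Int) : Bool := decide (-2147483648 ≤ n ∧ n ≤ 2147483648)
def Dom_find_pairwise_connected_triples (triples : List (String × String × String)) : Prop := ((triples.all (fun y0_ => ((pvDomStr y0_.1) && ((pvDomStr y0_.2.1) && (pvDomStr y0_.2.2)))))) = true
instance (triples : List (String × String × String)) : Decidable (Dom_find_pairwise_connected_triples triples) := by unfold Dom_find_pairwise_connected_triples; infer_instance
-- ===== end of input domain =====

-- B replaces A's defaultdict out-degree index with a plain nested double loop (simpler; O(n^2) vs A's O(n + output)).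

-- ===== PORT A =====
def find_pairwise_connected_triples (triples : List (String × String × String)) : List ((String × String × String) × (String × String × String)) :=
  let out_degree : PySem.Dict String (List (String × String × String)) :=
    triples.foldl (fun d triple => d.modify triple.1 [] (fun l => l ++ [triple])) PySem.Dict.empty
  triples.foldl (fun connected_pairs triple =>
    if out_degree.contains triple.2.2 then
      (out_degree.getD triple.2.2 []).foldl
        (fun acc next_triple => acc ++ [(triple, next_triple)]) connected_pairs
    else connected_pairs) []

-- ===== PORT B =====
def find_pairwise_connected_triples_alt (triples : List (String × String × String)) : List ((String × String × String) × (String × String × String)) :=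
  triples.foldl (fun connected_pairs t1 =>
    triples.foldl (fun acc t2 =>
      if t2.1 == t1.2.2 then acc ++ [(t1, t2)] else acc) connected_pairs) []

-- ===== PRECONDITION & SPEC =====
def Spec_find_pairwise_connected_triples (triples : List (String × String × String)) (out : List ((String × String × String) × (String × String × String))) : Prop := out = find_pairwise_connected_triples_alt triples
instance (triples : List (String × String × String)) (out : List ((String × String × String) × (String × String × String))) : Decidable (Spec_find_pairwise_connected_triples triples out) := by unfold Spec_find_pairwise_connected_triples; infer_instance

-- ===== CLAIM (what is proved, stated in full; the proofs are below) =====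
def Claim_equal_find_pairwise_connected_triples : Prop := ∀ (triples : List (String × String × String)), Dom_find_pairwise_connected_triples triples → Spec_find_pairwise_connected_triples triples (find_pairwise_connected_triples triples)

-- ===== LEMMAS AND PROOFS =====

-- The grouping loop's dict looks up to the filter of the input by start component.
theorem getD_build_eq_filter (l : List (String × String × String))
    (d : PySem.Dict String (List (String × String × String))) (k : String) :
    (l.foldl (fun d t => d.modify t.1 [] (fun acc => acc ++ [t])) d).getD k []
      = d.getD k [] ++ l.filter (fun t => t.1 == k) := by
  induction l generalizing d with
  | nil => simp
  | cons t ts ih =>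
    simp only [List.foldl_cons, ih, List.filter_cons]
    rw [PySem.Dict.getD_modify]
    by_cases h : k = t.1
    · simp [h]
    · have : (t.1 == k) = false := by simp; exact fun e => h e.symm
      simp [h, this]

theorem find_pairwise_connected_triples_spec' (triples : List (String × String × String)) :
    find_pairwise_connected_triples triples = find_pairwise_connected_triples_alt triples := by
  unfold find_pairwise_connected_triples find_pairwise_connected_triples_alt
  apply PySem.List.foldl_congr_mem
  intro acc t _
  set D := triples.foldl (fun d t => d.modify t.1 [] (fun acc => acc ++ [t])) PySem.Dict.empty with hD
  have hget : D.getD t.2.2 [] = triples.filter (fun t2 => t2.1 == t.2.2) := by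
    rw [hD, getD_build_eq_filter]; simp
  have core : (D.getD t.2.2 []).foldl (fun acc nt => acc ++ [(t, nt)]) acc
      = triples.foldl (fun acc t2 => if t2.1 == t.2.2 then acc ++ [(t, t2)] else acc) acc := by
    rw [hget, List.foldl_filter]
  by_cases hc : D.contains t.2.2
  · simp only [hc, if_true, core]
  · have hnone : D.getD t.2.2 [] = [] :=
      by
      have h' : D.contains t.2.2 = false := by simpa using hc
      exact PySem.Dict.getD_of_not_contains D [] h'
    simp only [hc]
    rw [← core, hnone]
    simp

-- ===== VERDICT (by name: the statement is the Claim_ definition above) =====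
theorem find_pairwise_connected_triples_spec : Claim_equal_find_pairwise_connected_triples := by
  intro triples _
  exact find_pairwise_connected_triples_spec' triples
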